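-- pv_equiv track=rewrite | github.com/Adam-Guerin/Asmblr | app/bench_edi.py | _is_claim_supported
-- ===== SOURCE A (Python) =====
-- def _is_claim_supported(claim: dict, evidence_bundle: dict) -> bool:
--     """Check if claim is supported by evidence."""
--     evidence_snippets = evidence_bundle.get('snippets', [])
--     claim_content = claim['content'].lower()
--
--     for snippet in evidence_snippets:
--         snippet_text = snippet.get('text', '').lower()
--         if any(word in snippet_text for word in claim_content.split() if len(word) > 3):
--             return True
--
--     return False
-- ===== SOURCE B (Python) =====
-- def _is_claim_supported(claim: dict, evidence_bundle: dict) -> bool: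
--     """Check if claim is supported by evidence.
--
--     Staged re-implementation: accumulate one space-prefixed lowered corpus,
--     pre-filter the long claim words once, then scan the corpus per word.
--     The space separator keeps words (which contain no whitespace) from
--     matching across snippet boundaries.
--     """
--     corpus = ''
--     for snippet in evidence_bundle.get('snippets', []):
--         corpus += ' ' + snippet.get('text', '').lower()
--     long_words = [w for w in claim['content'].lower().split() if len(w) > 3]
--     for w in long_words:
--         if w in corpus:
--             return True
--     return False
-- ===== Notes on version B (the rewrite author's own statement) =====
-- stated objective: alternative
-- what changed: B replaces A's nested per-snippet/per-word scan by three staged passes: it first accumulates all lowered snippet texts into one space-separated corpus string, then filters the claim's long (len>3) words once, then runs a single search loop testing each surviving word against the combined corpus; the space separator guarantees no word can match across a snippet boundary.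
-- outside the precondition, e.g. on _is_claim_supported({}, {'snippets': []}): A raises KeyError, B raises KeyError
import Mathlib
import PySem

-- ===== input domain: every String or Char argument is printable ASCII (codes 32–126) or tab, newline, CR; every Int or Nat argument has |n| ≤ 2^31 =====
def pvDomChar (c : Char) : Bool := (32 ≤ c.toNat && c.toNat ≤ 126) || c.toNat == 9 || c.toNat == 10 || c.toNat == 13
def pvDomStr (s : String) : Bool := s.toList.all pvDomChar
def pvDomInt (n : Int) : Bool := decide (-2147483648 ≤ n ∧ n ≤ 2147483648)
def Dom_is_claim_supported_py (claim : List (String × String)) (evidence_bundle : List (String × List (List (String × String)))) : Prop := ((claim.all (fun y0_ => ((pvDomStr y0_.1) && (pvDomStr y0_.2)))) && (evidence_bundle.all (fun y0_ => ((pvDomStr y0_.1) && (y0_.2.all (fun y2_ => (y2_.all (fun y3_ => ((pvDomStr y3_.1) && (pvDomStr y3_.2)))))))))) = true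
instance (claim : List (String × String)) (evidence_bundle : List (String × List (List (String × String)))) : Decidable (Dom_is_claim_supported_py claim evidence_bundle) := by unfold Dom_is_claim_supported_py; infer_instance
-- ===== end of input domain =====

-- B restructures A's nested per-snippet scan into three staged passes: accumulate one space-separated
-- lowered corpus, filter the long claim words once, then search each surviving word in the corpus
-- (objective: alternative decomposition, same cost class).

-- ===== PORT A =====
-- Literal port of A: loop over snippets, for each one scan the claim's long words for a substring hit.
def is_claim_supported_py (claim : List (String × String)) (evidence_bundle : List (String × List (List (String × String)))) : Bool :=
  let evidence_snippets := PySem.Dict.getD (PySem.Dict.mk evidence_bundle) "snippets" []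
  match PySem.Dict.get? (PySem.Dict.mk claim) "content" with
  | none => false  -- Python raises KeyError here; excluded by Pre_
  | some content =>
    let claim_content := PySem.Str.lower content
    evidence_snippets.any (fun snippet =>
      let snippet_text := PySem.Str.lower (PySem.Dict.getD (PySem.Dict.mk snippet) "text" "")
      (PySem.Str.split₀ claim_content).any (fun word =>
        decide (3 < PySem.Str.len word) && PySem.Str.isIn word snippet_text))

-- ===== PORT B =====
-- B's search loop: first word that occurs in the corpus returns True, else False.
def pvSearchWords : List String → String → Bool
  | [], _ => false
  | w :: ws, corpus => if PySem.Str.isIn w corpus then true else pvSearchWords ws corpus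

-- Literal port of B: accumulate the corpus with a fold ('corpus += ...'), filter the long words, search.
def is_claim_supported_py_alt (claim : List (String × String)) (evidence_bundle : List (String × List (List (String × String)))) : Bool :=
  let corpus := (PySem.Dict.getD (PySem.Dict.mk evidence_bundle) "snippets" []).foldl
    (fun acc snippet => acc ++ " " ++ PySem.Str.lower (PySem.Dict.getD (PySem.Dict.mk snippet) "text" "")) ""
  match PySem.Dict.get? (PySem.Dict.mk claim) "content" with
  | none => false  -- Python raises KeyError here; excluded by Pre_
  | some content =>
    let long_words := (PySem.Str.split₀ (PySem.Str.lower content)).filter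
      (fun w => decide (3 < PySem.Str.len w))
    pvSearchWords long_words corpus

-- ===== PRECONDITION & SPEC =====
-- Pre_ excludes only claim dicts without a 'content' key, on which Python A raises KeyError.
def Pre_is_claim_supported_py (claim : List (String × String)) (evidence_bundle : List (String × List (List (String × String)))) : Prop :=
  PySem.Dict.contains (PySem.Dict.mk claim) "content" = true
instance (claim : List (String × String)) (evidence_bundle : List (String × List (List (String × String)))) : Decidable (Pre_is_claim_supported_py claim evidence_bundle) := by unfold Pre_is_claim_supported_py; infer_instance
def pvWitness_is_claim_supported_py : (List (String × String)) × (List (String × List (List (String × String)))) :=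
  ([("content", "Water boils here")], [("snippets", [[("text", "water boils at 100 C")]])])

def Spec_is_claim_supported_py (claim : List (String × String)) (evidence_bundle : List (String × List (List (String × String)))) (out : Bool) : Prop := out = is_claim_supported_py_alt claim evidence_bundle
instance (claim : List (String × String)) (evidence_bundle : List (String × List (List (String × String)))) (out : Bool) : Decidable (Spec_is_claim_supported_py claim evidence_bundle out) := by unfold Spec_is_claim_supported_py; infer_instance

-- ===== CLAIM (what is proved, stated in full; the proofs are below) =====
def Claim_equal_is_claim_supported_py : Prop := ∀ (claim : List (String × String)) (evidence_bundle : List (String × List (List (String × String)))), Dom_is_claim_supported_py claim evidence_bundle → Pre_is_claim_supported_py claim evidence_bundle → Spec_is_claim_supported_py claim evidence_bundle (is_claim_supported_py claim evidence_bundle)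

-- ===== LEMMAS AND PROOFS =====

-- B's search loop is an 'any' over the word list.
lemma pvSearchWords_eq_any (ws : List String) (c : String) :
    pvSearchWords ws c = ws.any (fun w => PySem.Str.isIn w c) := by
  induction ws with
  | nil => rfl
  | cons w ws ih =>
    simp only [pvSearchWords, List.any_cons, ih]
    cases PySem.Str.isIn w c <;> simp

-- A word (no whitespace) that is a prefix of x ++ c :: y, with c not in the word, is a prefix of x.
lemma prefix_split_of_not_mem {w x y : List Char} {c : Char} (hc : c ∉ w)
    (h : w <+: x ++ c :: y) : w <+: x := by
  induction w generalizing x with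
  | nil => exact List.nil_prefix
  | cons d w' ih =>
    cases x with
    | nil =>
      rcases h with ⟨t, ht⟩
      simp only [List.nil_append, List.cons_append, List.cons.injEq] at ht
      exact absurd (ht.1 ▸ List.mem_cons_self) hc
    | cons a x' =>
      rcases h with ⟨t, ht⟩
      simp only [List.cons_append, List.cons.injEq] at ht
      obtain ⟨rfl, ht2⟩ := ht
      rcases ih (fun hm => hc (List.mem_cons_of_mem _ hm)) ⟨t, ht2⟩ with ⟨u, hu⟩
      exact ⟨u, by simp [← hu]⟩

-- A nonempty word not containing c that is an infix of x ++ c :: y is an infix of x or of y.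
lemma infix_split_of_not_mem {w x y : List Char} {c : Char} (hne : w ≠ []) (hc : c ∉ w)
    (h : w <:+: x ++ c :: y) : w <:+: x ∨ w <:+: y := by
  induction x with
  | nil =>
    rw [List.nil_append, List.infix_cons_iff] at h
    rcases h with hp | hi
    · cases w with
      | nil => exact absurd rfl hne
      | cons d w' =>
        rcases hp with ⟨t, ht⟩
        simp only [List.cons_append, List.cons.injEq] at ht
        exact absurd (ht.1 ▸ List.mem_cons_self) hc
    · exact Or.inr hi
  | cons a x' ih =>
    rw [List.cons_append, List.infix_cons_iff] at h
    rcases h with hp | hi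
    · exact Or.inl (prefix_split_of_not_mem hc hp).isInfix
    · rcases ih hi with h1 | h2
      · exact Or.inl (h1.trans (List.suffix_cons a x').isInfix)
      · exact Or.inr h2

-- A nonempty space-free word is an infix of x ++ flatMap (' ' :: ·) ts iff of x or of some part.
lemma infix_append_flatMap_space {w : List Char} (x : List Char) (ts : List (List Char))
    (hne : w ≠ []) (hc : (' ' : Char) ∉ w) :
    w <:+: x ++ ts.flatMap (fun t => ' ' :: t) ↔ w <:+: x ∨ ∃ t ∈ ts, w <:+: t := by
  induction ts generalizing x with
  | nil => simp
  | cons t rest ih =>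
    have hshape : x ++ (t :: rest).flatMap (fun t => ' ' :: t)
        = x ++ ' ' :: (t ++ rest.flatMap (fun t => ' ' :: t)) := by simp
    rw [hshape]
    constructor
    · intro h
      rcases infix_split_of_not_mem hne hc h with h1 | h2
      · exact Or.inl h1
      · rcases (ih t).mp h2 with h3 | ⟨u, hu, hwu⟩
        · exact Or.inr ⟨t, List.mem_cons_self, h3⟩
        · exact Or.inr ⟨u, List.mem_cons_of_mem _ hu, hwu⟩
    · rintro (h1 | ⟨u, hu, hwu⟩)
      · exact h1.trans (List.prefix_append x _).isInfix
      · have h2 : w <:+: t ++ rest.flatMap (fun t => ' ' :: t) := by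
          rcases List.mem_cons.mp hu with rfl | hu'
          · exact (ih u).mpr (Or.inl hwu)
          · exact (ih t).mpr (Or.inr ⟨u, hu', hwu⟩)
        exact h2.trans ⟨x ++ [' '], [], by simp⟩

-- The corpus fold appends ' ' :: text for each snippet.
lemma corpus_toList (ts : List String) (acc : String) :
    (ts.foldl (fun a t => a ++ " " ++ t) acc).toList
      = acc.toList ++ ts.flatMap (fun t => ' ' :: t.toList) := by
  induction ts generalizing acc with
  | nil => simp
  | cons t rest ih =>
    simp only [List.foldl_cons, List.flatMap_cons, ih]
    have : (acc ++ " " ++ t).toList = acc.toList ++ ' ' :: t.toList := by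
      simp [String.toList_append]
    rw [this]
    simp

-- Every word produced by split() contains no whitespace character.
lemma split₀_go_no_space (s cur : List Char) (acc : List (List Char))
    (hcur : ∀ ch ∈ cur, PySem.Chars.isspace ch = false)
    (hacc : ∀ v ∈ acc, ∀ ch ∈ v, PySem.Chars.isspace ch = false) :
    ∀ v ∈ PySem.Chars.split₀.go s cur acc, ∀ ch ∈ v, PySem.Chars.isspace ch = false := by
  induction s generalizing cur acc with
  | nil =>
    intro v hv
    unfold PySem.Chars.split₀.go at hv
    split at hv
    · exact hacc v (by simpa using hv)
    · simp only [List.mem_reverse, List.mem_cons] at hv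
      rcases hv with rfl | hv'
      · intro ch hch; exact hcur ch (List.mem_reverse.mp hch)
      · exact hacc v hv'
  | cons c rest ih =>
    intro v hv
    unfold PySem.Chars.split₀.go at hv
    by_cases hsp : PySem.Chars.isspace c = true
    · simp only [hsp, if_true] at hv
      split at hv
      · exact ih [] acc (by simp) hacc v hv
      · refine ih [] (cur.reverse :: acc) (by simp) ?_ v hv
        intro u hu
        rcases List.mem_cons.mp hu with rfl | hu'
        · intro ch hch; exact hcur ch (List.mem_reverse.mp hch)
        · exact hacc u hu'
    · simp only [hsp] at hv
      refine ih (c :: cur) acc ?_ hacc v hv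
      intro ch hch
      rcases List.mem_cons.mp hch with rfl | hch'
      · exact Bool.eq_false_iff.mpr hsp
      · exact hcur ch hch'

lemma split₀_no_space (s : List Char) :
    ∀ v ∈ PySem.Chars.split₀ s, ∀ ch ∈ v, PySem.Chars.isspace ch = false := by
  unfold PySem.Chars.split₀
  exact split₀_go_no_space s [] [] (by simp) (by simp)

-- The core exchange: A's nested scan equals B's staged filter-then-corpus-scan.
lemma nested_eq_staged (ws ts : List String)
    (hws : ∀ w ∈ ws, ∀ ch ∈ w.toList, PySem.Chars.isspace ch = false) :
    ts.any (fun t => ws.any (fun w => decide (3 < PySem.Str.len w) && PySem.Str.isIn w t))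
      = (ws.filter (fun w => decide (3 < PySem.Str.len w))).any
          (fun w => PySem.Str.isIn w (ts.foldl (fun a t => a ++ " " ++ t) "")) := by
  rw [Bool.eq_iff_iff]
  simp only [List.any_eq_true, List.mem_filter, Bool.and_eq_true, decide_eq_true_eq,
    PySem.Str.isIn_iff_infix, PySem.Str.len_eq, corpus_toList]
  have hbridge : ts.flatMap (fun t : String => ' ' :: t.toList)
      = (ts.map String.toList).flatMap (fun t : List Char => ' ' :: t) := by
    induction ts with
    | nil => rfl
    | cons t rest ih => simp [ih]
  have hnospace : ∀ w ∈ ws, (3 : ℤ) < w.toList.length →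
      w.toList ≠ [] ∧ (' ' : Char) ∉ w.toList := by
    intro w hw hlen
    refine ⟨fun h0 => by rw [h0] at hlen; simp at hlen, fun hm => ?_⟩
    exact absurd (hws w hw ' ' hm) (by decide)
  constructor
  · rintro ⟨t, ht, w, hw, hlen, hinf⟩
    obtain ⟨hne, hc⟩ := hnospace w hw hlen
    refine ⟨w, ⟨hw, hlen⟩, ?_⟩
    rw [show ("" : String).toList = [] from rfl, List.nil_append, hbridge]
    exact (infix_append_flatMap_space [] (ts.map String.toList) hne hc).mpr
      (Or.inr ⟨t.toList, List.mem_map_of_mem ht, hinf⟩)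
  · rintro ⟨w, ⟨hw, hlen⟩, hinf⟩
    obtain ⟨hne, hc⟩ := hnospace w hw hlen
    rw [show ("" : String).toList = [] from rfl, List.nil_append, hbridge] at hinf
    rcases (infix_append_flatMap_space [] (ts.map String.toList) hne hc).mp
        (by simpa using hinf) with h1 | ⟨l, hl, hwl⟩
    · simp [List.infix_nil, hne] at h1
    · rcases List.mem_map.mp hl with ⟨t, ht, rfl⟩
      exact ⟨t, ht, w, hw, hlen, hwl⟩

-- ===== VERDICT (by name: the statement is the Claim_ definition above) =====
theorem is_claim_supported_py_spec : Claim_equal_is_claim_supported_py := by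
  intro claim evidence_bundle _ hpre
  unfold Spec_is_claim_supported_py is_claim_supported_py is_claim_supported_py_alt
  cases hget : PySem.Dict.get? (PySem.Dict.mk claim) "content" with
  | none =>
    exfalso
    rw [Pre_is_claim_supported_py, PySem.Dict.contains_eq_isSome_get?, hget] at hpre
    simp at hpre
  | some content =>
    simp only [pvSearchWords_eq_any]
    have hws' : ∀ w ∈ PySem.Str.split₀ (PySem.Str.lower content),
        ∀ ch ∈ w.toList, PySem.Chars.isspace ch = false := fun w hw => by
      have := split₀_no_space (PySem.Str.lower content).toList w.toList
      rw [← PySem.Str.split₀_map_toList] at this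
      exact this (List.mem_map_of_mem hw)
    have h := nested_eq_staged (PySem.Str.split₀ (PySem.Str.lower content))
        ((PySem.Dict.getD (PySem.Dict.mk evidence_bundle) "snippets" []).map
          (fun s => PySem.Str.lower (PySem.Dict.getD (PySem.Dict.mk s) "text" ""))) hws'
    rw [List.any_map, List.foldl_map] at h
    exact h
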